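/-
  SSE ON THE FLAT USER MACHINE, PART 3: the operand readers and writers of the SIMD layer (X86/Sem/Lib/{Simd,VecOperands}.lean)
  for a legacy encoding on an Intel processor.

      wpUser_vecAttr, wpUser_operandAttr     the alignment decision of a vector memory operand: a pure function here
      wpUser_readEvexSrc_reg / _mem          THE source reader: a register; a 4- / 8-byte scalar or an unaligned 16-byte operand
                                             in memory (plain attributes); `_mem16`: a 16-byte operand under the legacy 16-byte
                                             rule (aligned load)
      wpUser_writeScalarMasked               the scalar epilogue: element 0 replaced, bits 127:elemBits from SRC1, above 127 kept
      wpUser_writeVecMasked                  the packed epilogue: every element active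
      wpUser_writeVecMaskedMem               the memory-destination epilogue: probe, then one store
-/
import UserX.SseMem
set_option linter.unusedSimpArgs false
namespace X86
namespace Sem
open User

section
variable {L : Layout} {μ : Microarch} {E : Fault → State → Prop} {u : State} {e : Encoding}

/-! ### Registers -/

/-- A read of a vector register view. -/
theorem wpUser_readVec {Q : Vec → State → Prop} (w : VWidth) (r : VReg) :
    wpUser L μ (Insn.readVec w r) Q E u = Q (u.readVec w r) u := by
  unfold Insn.readVec Sem.get
  rw [wpUser_read_vec, wpUser_pure]

/-- A legacy-SSE write of a vector register view: the bits above the view are kept. -/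
theorem wpUser_writeVec_preserve {Q : Unit → State → Prop} (w : VWidth) (r : VReg) (v : Vec) :
    wpUser L μ (Insn.writeVec w .preserve r v) Q E u = Q () (u.writeVecLow w r v) := by
  unfold Insn.writeVec Sem.put
  rw [wpUser_write_vecLow, wpUser_pure, true_and]

/-! ### The alignment decision -/

/-- The attributes `Encoding.vecAttr` computes on an Intel processor (`amd = false`: MXCSR.MM is not consulted, the
"natural boundary" of AMD plays no part). -/
def vecAttrIntel (cls : VecAlignClass) (bytes : Nat) (hint : AccessHint) (ac : VecAc) : AccessAttr :=
  let small := if bytes == 2 || bytes == 4 || bytes == 8 then bytes else 1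
  let base : AccessAttr := { hint := hint }
  let r : AccessAttr :=
    match cls with
    | .none => base
    | .explicitAligned n => { base with align := n }
    | .legacyAligned => if bytes < 16 then { base with acAlign := small } else { base with align := 16 }
    | .legacyUnaligned => { base with acAlign := small }
    | .vexAny => { base with acAlign := small }
    | .maskmov => base
  match ac.intel with
  | some n => { r with acAlign := n }
  | none => r

theorem wpUser_vecAttr {Q : AccessAttr → State → Prop} (hμ : SseMicro μ) (cls : VecAlignClass) (bytes : Nat)
    (hint : AccessHint) (ac : VecAc) :
    wpUser L μ (Insn.Encoding.vecAttr e cls bytes hint ac) Q E u = Q (vecAttrIntel cls bytes hint ac) u := by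
  unfold Insn.Encoding.vecAttr vecAttrIntel Insn.X86.config VecAc.forVendor
  cases cls <;> cases hac : ac.intel <;>
    simp only [Sem.get, wpUser_bind', wpUser_askμ, wpUser_read_mxcsr, wpUser_pure, wpUser_pure', hμ.cfgVendor, hac,
      show (Vendor.intel == Vendor.amd) = false from rfl, Bool.false_and, Bool.false_eq_true, if_false] <;>
    first | rfl | (split <;> simp only [wpUser_bind', wpUser_pure'])

/-- The attributes `Encoding.operandAttr` computes on an Intel processor. -/
def operandAttrIntel (e : Encoding) (vl : VWidth) (nbytes : Nat) (r : SimdMem) : AccessAttr :=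
  let cls : VecAlignClass :=
    match r.cls with
    | some c => c
    | none =>
      if nbytes == vl.bytes || nbytes ≥ 16 then e.vecClass nbytes r.aligned r.unaligned
      else if r.aligned then .explicitAligned nbytes
      else if e.form == .legacy then .legacyUnaligned else .vexAny
  let a := vecAttrIntel cls nbytes r.hint r.acBytes
  if r.ac || r.acBytes.intel.isSome then a else { a with acAlign := 1 }

theorem wpUser_operandAttr {Q : AccessAttr → State → Prop} (hμ : SseMicro μ) (vl : VWidth) (nbytes : Nat) (r : SimdMem) :
    wpUser L μ (Insn.Encoding.operandAttr e vl nbytes r) Q E u = Q (operandAttrIntel e vl nbytes r) u := by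
  unfold Insn.Encoding.operandAttr operandAttrIntel Insn.X86.config VecAc.forVendor
  simp only [wpUser_bind', wpUser_vecAttr hμ, wpUser_askμ, wpUser_pure', hμ.cfgVendor,
    show (Vendor.intel == Vendor.amd) = false from rfl, Bool.false_eq_true, if_false]
  rfl

/-- **A scalar operand (2, 4 or 8 bytes … anything below 16) of a legacy instruction carries plain attributes**: no `#GP`
alignment rule; the `#AC` class is its size (and CR0.AM = 0). -/
theorem operandAttr_plain_small (he : Legacy e) (nbytes : Nat) (r : SimdMem) (hn : nbytes < 16) (hc : r.cls = none)
    (hal : r.aligned = false) (hh : r.hint = .normal) {off : Word} : PlainAttr (operandAttrIntel e .v128 nbytes r) off := by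
  have h1 : (nbytes == VWidth.v128.bytes || decide (nbytes ≥ 16)) = false := by
    have : VWidth.v128.bytes = 16 := rfl
    simp [this]
    omega
  unfold operandAttrIntel vecAttrIntel
  simp only [hc, h1, hal, he.form_eq, hh, Bool.false_eq_true, if_false, if_true]
  cases r.acBytes.intel <;> split <;> exact PlainAttr.of_unaligned rfl rfl rfl rfl

/-- **The 16-byte operand of an explicitly unaligned legacy move (MOVUPS, MOVDQU …) carries plain attributes.** -/
theorem operandAttr_plain_unaligned16 (he : Legacy e) {off : Word} :
    PlainAttr (operandAttrIntel e .v128 16 SimdMem.unalignedMove) off := by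
  unfold operandAttrIntel vecAttrIntel Encoding.vecClass
  simp only [he.form_eq]
  exact PlainAttr.of_unaligned rfl rfl rfl rfl

/-- **The 16-byte operand of a legacy load-op instruction (XORPS xmm, m128 …) is under the 16-byte rule**: `align = 16`,
nothing else special: plain at an offset that is 16-byte aligned. -/
theorem operandAttr_aligned16 (he : Legacy e) (r : SimdMem) (hc : r.cls = none) (hal : r.aligned = false)
    (hun : r.unaligned = false) (hh : r.hint = .normal) (off : Word) (hoff : off.aligned 16 = true) :
    PlainAttr (operandAttrIntel e .v128 16 r) off := by
  unfold operandAttrIntel vecAttrIntel Encoding.vecClass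
  simp only [hc, hal, hun, he.form_eq, hh]
  cases r.acBytes.intel <;> split <;> exact PlainAttr.of_aligned hoff rfl rfl rfl

/-! ### Sources -/

/-- The legacy masking contexts select every element. -/
theorem scalarCtx_active (bits : Nat) : (scalarCtx bits).active 0 = true := by
  show (1 : Word).bit 0 = true
  decide

theorem scalarCtx_allActive (bits : Nat) : (scalarCtx bits).allActive = true := by
  show ((1 : Word) == Word.mask 1) = true
  decide

theorem scalarCtx_all (bits : Nat) : (List.range (scalarCtx bits).kl).all (scalarCtx bits).active = true := by
  show ((List.range 1).all fun i => (1 : Word).bit i) = true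
  decide

/-- **A register source**: the low `kl` elements of the register. -/
theorem wpUser_readEvexSrc_reg {Q : Vec → State → Prop} (he : Legacy e) (c : Masking) (elemBytes : Nat) (reg : VReg)
    (r : SimdMem) (attr : Option AccessAttr) :
    wpUser L μ (Insn.readEvexSrc e c elemBytes (.vreg reg) r attr) Q E u =
      Q ((u.readVec .v512 reg).trunc (8 * elemBytes * c.kl)) u := by
  unfold Insn.readEvexSrc
  simp only [wpUser_bind', wpUser_checkEvexB he, wpUser_readVec, wpUser_pure']

/-- **A memory source whose elements are all selected, with plain attributes**: one load of `kl · elemBytes` bytes. -/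
theorem wpUser_readEvexSrc_mem {Q : Vec → State → Prop} (he : Legacy e) (hμ : SseMicro μ) (c : Masking)
    (elemBytes : Nat) (a : MemOp) (r : SimdMem) (hall : (List.range c.kl).all c.active = true)
    (hattr : PlainAttr (operandAttrIntel e c.vl (c.kl * elemBytes) r) (u.ea a)) (hn : 0 < c.kl * elemBytes)
    (hhas : L.Has (u.ea a) (c.kl * elemBytes))
    (h : Q (BitVec.ofNat 512 (u.mem.readLE (u.ea a) (c.kl * elemBytes))) u) :
    wpUser L μ (Insn.readEvexSrc e c elemBytes (.vmem a) r none) Q E u := by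
  unfold Insn.readEvexSrc Insn.readMaskedMem
  simp only [wpUser_bind', wpUser_checkEvexB he, he.isEvex, Bool.false_and, Bool.false_eq_true, if_false,
    wpUser_operandAttr hμ, hall, Bool.or_true, if_true, wpUser_pure']
  exact wpUser_readMemOp a _ _ hattr hn hhas h

/-- **A 16-byte memory source under the legacy 16-byte rule** (`xmm, m128` of a load-op instruction): one aligned load. -/
theorem wpUser_readEvexSrc_mem16 {Q : Vec → State → Prop} (he : Legacy e) (hμ : SseMicro μ) (c : Masking)
    (elemBytes : Nat) (a : MemOp) (r : SimdMem) (hvl : c.vl = .v128) (h16 : c.kl * elemBytes = 16)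
    (hall : (List.range c.kl).all c.active = true) (hc : r.cls = none) (hal : r.aligned = false)
    (hun : r.unaligned = false) (hh : r.hint = .normal) (halign : (u.ea a).aligned 16 = true)
    (hhas : L.Has (u.ea a) 16) (h : Q (BitVec.ofNat 512 (u.mem.readLE (u.ea a) 16)) u) :
    wpUser L μ (Insn.readEvexSrc e c elemBytes (.vmem a) r none) Q E u := by
  unfold Insn.readEvexSrc Insn.readMaskedMem
  simp only [wpUser_bind', wpUser_checkEvexB he, he.isEvex, Bool.false_and, Bool.false_eq_true, if_false,
    wpUser_operandAttr hμ, hall, Bool.or_true, if_true, wpUser_pure', h16, hvl]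
  exact wpUser_readMemOp a 16 _ (operandAttr_aligned16 he r hc hal hun hh _ halign) (by decide) hhas h

/-! ### Destinations -/

/-- **The scalar epilogue** of a legacy instruction: element 0 becomes `x` (at `elemBits` bits), bits 127:elemBits come from
`upperSrc`, bits above 127 of the register are kept. -/
theorem wpUser_writeScalarMasked {Q : Unit → State → Prop} (he : Legacy e) (bits : Nat) (dst : VReg) (x : Word)
    (upperSrc : Vec) :
    wpUser L μ (Insn.writeScalarMasked e (scalarCtx bits) dst x upperSrc) Q E u =
      Q () (u.writeVecLow .v128 dst (Vec.setElem (upperSrc.trunc 128) bits 0 (x &&& Word.mask bits))) := by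
  unfold Insn.writeScalarMasked Sem.put
  simp only [wpUser_bind', wpUser_readVec, scalarCtx_active, if_true, he.upper, wpUser_write_vecLow, wpUser_pure, true_and]
  rfl

/-- **The packed epilogue** of a legacy instruction: the merge under the all-ones mask, written at 128 bits; bits above 127 of
the register are kept. -/
theorem wpUser_writeVecMasked {Q : Unit → State → Prop} (he : Legacy e) (elemBits countBits : Nat) (dst : VReg) (v : Vec) :
    wpUser L μ (Insn.writeVecMasked e (packedCtx elemBits countBits) dst v none) Q E u =
      Q () (u.writeVecLow .v128 dst
        ((maskMerge elemBits (packedCtx elemBits countBits).kl (packedCtx elemBits countBits).k false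
          (u.readVec .v512 dst) v).trunc (elemBits * (packedCtx elemBits countBits).kl))) := by
  unfold Insn.writeVecMasked Sem.put Sem.get
  simp only [wpUser_bind', wpUser_pure', wpUser_read_vec, wpUser_pure, he.upper]
  show wpUser L μ (Sem.writeReg (RegRef.vec .v128 .preserve dst _) _ (Sem.pure ())) Q E u = _
  rw [wpUser_write_vecLow, wpUser_pure, true_and]
  rfl

/-! The merge under the all-ones mask of a legacy packed instruction IS the new value (at 128 bits): by bit-blasting, for the two
element sizes the image uses (32: MOVAPS MOVUPS MOVDQU XORPS PXOR; 64: MOVAPD XORPD). -/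

theorem bit15_0 : Word.bit 15 0 = true := by decide
theorem bit15_1 : Word.bit 15 1 = true := by decide
theorem bit15_2 : Word.bit 15 2 = true := by decide
theorem bit15_3 : Word.bit 15 3 = true := by decide
theorem bit3_0 : Word.bit 3 0 = true := by decide
theorem bit3_1 : Word.bit 3 1 = true := by decide

/-- Four doublewords, all selected: the low 128 bits of the merge are the low 128 bits of the new value. -/
theorem packedMerge32 (old new : Vec) :
    (maskMerge 32 (packedCtx 32 32).kl (packedCtx 32 32).k false old new).trunc (32 * (packedCtx 32 32).kl) =
      new.trunc 128 := by
  have hk : (packedCtx 32 32).kl = 4 := rfl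
  have hm : (packedCtx 32 32).k = 0xF := by decide
  rw [hk, hm]
  simp only [maskMerge, List.range, List.range.loop, List.foldl, bit15_0, bit15_1, bit15_2, bit15_3, if_true,
    Vec.setElem, Vec.elem, Vec.trunc, Vec.lowMask, Word.ofBV, Nat.reduceMul, Nat.reduceSub, UInt64.toBitVec_ofBitVec]
  clear hk hm
  unfold Vec at *
  bv_decide

/-- Two quadwords, both selected. -/
theorem packedMerge64 (old new : Vec) :
    (maskMerge 64 (packedCtx 64 64).kl (packedCtx 64 64).k false old new).trunc (64 * (packedCtx 64 64).kl) =
      new.trunc 128 := by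
  have hk : (packedCtx 64 64).kl = 2 := rfl
  have hm : (packedCtx 64 64).k = 0x3 := by decide
  rw [hk, hm]
  simp only [maskMerge, List.range, List.range.loop, List.foldl, bit3_0, bit3_1, if_true,
    Vec.setElem, Vec.elem, Vec.trunc, Vec.lowMask, Word.ofBV, Nat.reduceMul, Nat.reduceSub, UInt64.toBitVec_ofBitVec]
  clear hk hm
  unfold Vec at *
  bv_decide

/-- A 128-bit register write looks at the low 128 bits of the value only. -/
theorem writeVecLow_trunc (r : VReg) (x : Vec) : u.writeVecLow .v128 r (x.trunc 128) = u.writeVecLow .v128 r x := by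
  have e : (x.trunc 128) &&& VWidth.v128.mask = x &&& VWidth.v128.mask := by
    simp only [Vec.trunc, Vec.lowMask, VWidth.mask, Nat.reduceSub]
    unfold Vec at *
    bv_decide
  unfold State.writeVecLow
  rw [e]

/-- The 128-bit view of a register just written at 128 bits: the low 128 bits of the value. -/
theorem readVec_writeVecLow (r : VReg) (x : Vec) : (u.writeVecLow .v128 r x).readVec .v128 r = x.trunc 128 := by
  unfold State.writeVecLow State.readVec
  simp only [Fin.getElem_fin, Vector.getElem_set_self, Vec.trunc, Vec.lowMask, VWidth.mask, Nat.reduceSub]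
  generalize u.zmm[r] = old
  unfold Vec at *
  bv_decide

/-- **The packed epilogue at doubleword granularity, simplified**: the low 128 bits of `dst` become those of `v`. -/
theorem wpUser_writeVecMasked32 {Q : Unit → State → Prop} (he : Legacy e) (dst : VReg) (v : Vec) :
    wpUser L μ (Insn.writeVecMasked e (packedCtx 32 32) dst v none) Q E u = Q () (u.writeVecLow .v128 dst v) := by
  rw [wpUser_writeVecMasked he, packedMerge32, writeVecLow_trunc]

/-- **The packed epilogue at quadword granularity, simplified.** -/
theorem wpUser_writeVecMasked64 {Q : Unit → State → Prop} (he : Legacy e) (dst : VReg) (v : Vec) :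
    wpUser L μ (Insn.writeVecMasked e (packedCtx 64 64) dst v none) Q E u = Q () (u.writeVecLow .v128 dst v) := by
  rw [wpUser_writeVecMasked he, packedMerge64, writeVecLow_trunc]

theorem packedCtx32_all : (List.range (packedCtx 32 32).kl).all (packedCtx 32 32).active = true := by decide
theorem packedCtx64_all : (List.range (packedCtx 64 64).kl).all (packedCtx 64 64).active = true := by decide
theorem packedCtx32_allActive : (packedCtx 32 32).allActive = true := by decide
theorem packedCtx64_allActive : (packedCtx 64 64).allActive = true := by decide

/-- **The memory-destination epilogue** with every element selected and plain attributes: the writability probe, then one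
store of `kl · elemBits/8` bytes. -/
theorem wpUser_writeVecMaskedMem {Q : Unit → State → Prop} (he : Legacy e) (hμ : SseMicro μ) (c : Masking) (a : MemOp)
    (v : Vec) (r : SimdMem) (hz : c.zeroing = false) (hall : c.allActive = true) (hh : r.hint = .normal)
    (hattr : PlainAttr (operandAttrIntel e c.vl (c.kl * (c.elemBits / 8)) r) (u.ea a)) (hn : 0 < c.kl * (c.elemBits / 8))
    (hhas : L.Has (u.ea a) (c.kl * (c.elemBits / 8)))
    (h : Q () (u.setMem (u.mem.writeLE (u.ea a) (c.kl * (c.elemBits / 8)) (v.trunc (c.elemBits * c.kl)).toNat))) :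
    wpUser L μ (Insn.writeVecMaskedMem e c a v r) Q E u := by
  unfold Insn.writeVecMaskedMem Insn.probeVecMaskedMem Insn.storeVecMaskedMem Insn.in64 Insn.X86.config Insn.X86.require
  simp only [wpUser_bind', wpUser_require, hz, Bool.not_false, if_true, wpUser_observe, wpUser_askμ, wpUser_effAddr,
    wpUser_operandAttr hμ, he.isEvex, Bool.false_and, Bool.false_eq_true, if_false, hall, Bool.or_true, wpUser_pure']
  intro m _
  apply wpUser_alignmentFirst _ _ _ hattr
  apply wpUser_probeWrite _ _ _ _ hattr hn hhas
  have hstore : PlainAttr ({ hint := r.hint } : AccessAttr) (u.ea a) := by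
    rw [hh]
    exact PlainAttr.of_unaligned rfl rfl rfl rfl
  exact wpUser_writeMemOp a _ _ _ hstore hn hhas h

end
end Sem
end X86
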